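-- pv_equiv track=rewrite | github.com/Tracywangsw/TagRecs | lda_rs/db.py | record_count
-- ===== SOURCE A (Python) =====
-- def record_count(records):
--   records_count = {}
--   for r in records:
--     (key_item,count_item) = r[:]
--     if key_item in records_count:
--       if count_item in records_count[key_item]: records_count[key_item][count_item] += 1
--       else: records_count[key_item][count_item] = 1
--     else: records_count.setdefault(key_item,{count_item:1})
--   return records_count
-- ===== SOURCE B (Python) =====
-- def record_count(records):
--   counter = {}
--   for r in records:
--     (key_item, count_item) = r[:]
--     pair = (key_item, count_item)
--     counter[pair] = counter.get(pair, 0) + 1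
--   result = {}
--   for (key_item, count_item), n in counter.items():
--     result.setdefault(key_item, {})[count_item] = n
--   return result
-- ===== Notes on version B (the rewrite author's own statement) =====
-- stated objective: alternative
-- what changed: B replaces the single-pass nested-dict update (branching on whether the outer and inner keys already exist) by two passes: first a flat counter keyed by the (key,count) tuple, then a rebuild pass that inserts each counted pair into the nested result via setdefault.
import Mathlib
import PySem

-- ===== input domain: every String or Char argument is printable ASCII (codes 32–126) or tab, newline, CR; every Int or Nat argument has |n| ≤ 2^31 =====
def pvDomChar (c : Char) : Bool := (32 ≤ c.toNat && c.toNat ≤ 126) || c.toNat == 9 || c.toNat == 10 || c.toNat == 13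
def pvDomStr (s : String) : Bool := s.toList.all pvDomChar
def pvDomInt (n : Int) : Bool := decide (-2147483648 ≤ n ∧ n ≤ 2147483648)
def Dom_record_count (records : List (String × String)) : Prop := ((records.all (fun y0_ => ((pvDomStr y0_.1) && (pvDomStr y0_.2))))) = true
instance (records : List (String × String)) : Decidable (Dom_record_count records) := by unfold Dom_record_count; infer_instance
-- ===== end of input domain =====

-- B counts (key,count) pairs into a flat counter first and rebuilds the nested dict in a second
-- pass, instead of A's single pass of branching nested updates; same cost, different decomposition.

-- ===== PORT A =====
-- one loop iteration of A: unpack r, update the nested dict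
def rcStepA (d : PySem.Dict String (PySem.Dict String Int)) (r : String × String) :
    PySem.Dict String (PySem.Dict String Int) :=
  let key_item := r.1
  let count_item := r.2
  if d.contains key_item then
    let inner := d.getD key_item PySem.Dict.empty
    if inner.contains count_item then
      d.insert key_item (inner.insert count_item (inner.getD count_item 0 + 1))
    else
      d.insert key_item (inner.insert count_item 1)
  else
    d.setdefault key_item (PySem.Dict.ofList [(count_item, (1 : Int))])

def record_count (records : List (String × String)) : List (String × List (String × Int)) :=
  ((records.foldl rcStepA PySem.Dict.empty).items).map (fun p => (p.1, p.2.items))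

-- ===== PORT B =====
-- first pass of B: counter[pair] = counter.get(pair, 0) + 1
def rcCount (d : PySem.Dict (String × String) Int) (r : String × String) :
    PySem.Dict (String × String) Int :=
  d.insert r (d.getD r 0 + 1)

-- second pass of B: result.setdefault(key_item, {})[count_item] = n
def rcBuild (d : PySem.Dict String (PySem.Dict String Int)) (it : (String × String) × Int) :
    PySem.Dict String (PySem.Dict String Int) :=
  let d' := d.setdefault it.1.1 PySem.Dict.empty
  d'.insert it.1.1 ((d'.getD it.1.1 PySem.Dict.empty).insert it.1.2 it.2)

def record_count_alt (records : List (String × String)) : List (String × List (String × Int)) :=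
  let counter := records.foldl rcCount PySem.Dict.empty
  let result := counter.items.foldl rcBuild PySem.Dict.empty
  result.items.map (fun p => (p.1, p.2.items))

-- ===== PRECONDITION & SPEC =====
def Spec_record_count (records : List (String × String)) (out : List (String × List (String × Int))) : Prop := out = record_count_alt records
instance (records : List (String × String)) (out : List (String × List (String × Int))) : Decidable (Spec_record_count records out) := by unfold Spec_record_count; infer_instance

-- ===== CLAIM (what is proved, stated in full; the proofs are below) =====
def Claim_equal_record_count : Prop := ∀ (records : List (String × String)), Dom_record_count records → Spec_record_count records (record_count records)

-- ===== LEMMAS AND PROOFS =====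

-- nested-dict single assignment d[k][c] = v (outer key created at the end if absent)
def nset (d : PySem.Dict String (PySem.Dict String Int)) (k c : String) (v : Int) :
    PySem.Dict String (PySem.Dict String Int) :=
  d.insert k ((d.getD k PySem.Dict.empty).insert c v)

def nsetP (d : PySem.Dict String (PySem.Dict String Int)) (it : (String × String) × Int) :
    PySem.Dict String (PySem.Dict String Int) :=
  nset d it.1.1 it.1.2 it.2

-- nested lookup d[k][c]
def nGet (d : PySem.Dict String (PySem.Dict String Int)) (k c : String) : Option Int :=
  (d.get? k).bind (fun i => i.get? c)

theorem rcBuild_eq (d : PySem.Dict String (PySem.Dict String Int)) (it : (String × String) × Int) :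
    rcBuild d it = nsetP d it := by
  show (d.setdefault it.1.1 PySem.Dict.empty).insert it.1.1
    (((d.setdefault it.1.1 PySem.Dict.empty).getD it.1.1 PySem.Dict.empty).insert it.1.2 it.2) =
    nsetP d it
  unfold nsetP nset
  by_cases h : d.contains it.1.1
  · rw [PySem.Dict.setdefault_of_contains _ _ h]
  · rw [PySem.Dict.setdefault_of_not_contains _ _ (by simpa using h)]
    rw [PySem.Dict.getD_insert_self, PySem.Dict.insert_insert_self,
        PySem.Dict.getD_of_not_contains _ _ (by simpa using h)]

theorem rcBuild_funext : rcBuild = nsetP := by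
  funext d it; exact rcBuild_eq d it

-- two inserts at distinct keys commute when the first key is already present
theorem dict_insert_insert_comm {κ ν : Type} [BEq κ] [LawfulBEq κ]
    (d : PySem.Dict κ ν) (k k' : κ) (a b : ν) (hk : d.contains k = true) (hne : k' ≠ k) :
    (d.insert k a).insert k' b = (d.insert k' b).insert k a := by
  apply PySem.Dict.ext
  by_cases hk' : d.contains k' = true
  · rw [PySem.Dict.items_insert_of_contains (d.insert k a) b (by
        rw [PySem.Dict.contains_insert, hk']; simp),
      PySem.Dict.items_insert_of_contains d a hk,
      PySem.Dict.items_insert_of_contains (d.insert k' b) a (by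
        rw [PySem.Dict.contains_insert, hk]; simp),
      PySem.Dict.items_insert_of_contains d b hk', List.map_map, List.map_map]
    apply List.map_congr_left
    intro p _
    by_cases h1 : p.1 = k <;> by_cases h2 : p.1 = k' <;>
      simp [Function.comp, h1, h2, hne, Ne.symm hne]
  · rw [PySem.Dict.items_insert_of_not_contains (d.insert k a) b (by
        rw [PySem.Dict.contains_insert]
        simp only [Bool.or_eq_false_iff]
        exact ⟨by simpa using hne, by simpa using hk'⟩),
      PySem.Dict.items_insert_of_contains d a hk,
      PySem.Dict.items_insert_of_contains (d.insert k' b) a (by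
        rw [PySem.Dict.contains_insert, hk]; simp),
      PySem.Dict.items_insert_of_not_contains d b (by simpa using hk'), List.map_append]
    simp [hne]

theorem nset_contains (d : PySem.Dict String (PySem.Dict String Int)) (k k' c : String) (v : Int)
    (hk : d.contains k = true) : (nset d k' c v).contains k = true := by
  unfold nset; rw [PySem.Dict.contains_insert, hk]; simp

theorem nset_inner_contains (d : PySem.Dict String (PySem.Dict String Int)) (k c k' c' : String)
    (v : Int) (hc : (d.getD k PySem.Dict.empty).contains c = true) :
    ((nset d k' c' v).getD k PySem.Dict.empty).contains c = true := by
  unfold nset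
  rw [PySem.Dict.getD_insert]
  by_cases h : k = k'
  · subst h; rw [if_pos rfl, PySem.Dict.contains_insert, hc]; simp
  · rw [if_neg h]; exact hc

theorem nGet_nset (d : PySem.Dict String (PySem.Dict String Int)) (k c k' c' : String) (v : Int) :
    nGet (nset d k' c' v) k c = if k = k' ∧ c = c' then some v else nGet d k c := by
  unfold nGet nset
  rw [PySem.Dict.get?_insert]
  by_cases hk : k = k'
  · subst hk
    rw [if_pos rfl, Option.bind_some, PySem.Dict.get?_insert]
    by_cases hc : c = c'
    · simp [hc]
    · rw [if_neg hc]
      simp only [hc, and_false, if_false]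
      rw [PySem.Dict.getD_eq_get?_getD]
      cases h : d.get? k <;> simp [PySem.Dict.get?_empty]
  · simp [hk]

theorem nset_comm (d : PySem.Dict String (PySem.Dict String Int)) (k c k' c' : String) (v n : Int)
    (hk : d.contains k = true) (hc : (d.getD k PySem.Dict.empty).contains c = true)
    (hne : (k', c') ≠ (k, c)) :
    nset (nset d k c v) k' c' n = nset (nset d k' c' n) k c v := by
  by_cases hkk : k' = k
  · subst hkk
    have hcc : c' ≠ c := by intro h; exact hne (by rw [h])
    unfold nset
    rw [PySem.Dict.getD_insert_self, PySem.Dict.getD_insert_self,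
        PySem.Dict.insert_insert_self, PySem.Dict.insert_insert_self,
        dict_insert_insert_comm (d.getD k' PySem.Dict.empty) c c' v n hc hcc]
  · unfold nset
    rw [PySem.Dict.getD_insert_of_ne _ _ _ hkk, PySem.Dict.getD_insert_of_ne _ _ _ (Ne.symm hkk)]
    exact dict_insert_insert_comm d k k' _ _ hk hkk

theorem foldl_nset_comm (l : List ((String × String) × Int))
    (d : PySem.Dict String (PySem.Dict String Int)) (k c : String) (v : Int)
    (hk : d.contains k = true) (hc : (d.getD k PySem.Dict.empty).contains c = true)
    (hl : ∀ x ∈ l, x.1 ≠ (k, c)) :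
    l.foldl nsetP (nset d k c v) = nset (l.foldl nsetP d) k c v := by
  induction l generalizing d with
  | nil => rfl
  | cons x l ih =>
    simp only [List.foldl_cons]
    have hx : (x.1.1, x.1.2) ≠ (k, c) := by
      have := hl x (by simp); simpa using this
    rw [show nsetP (nset d k c v) x = nset (nsetP d x) k c v from
      nset_comm d k c x.1.1 x.1.2 v x.2 hk hc hx]
    exact ih (nsetP d x) (nset_contains d k x.1.1 x.1.2 x.2 hk)
      (nset_inner_contains d k c x.1.1 x.1.2 x.2 hc)
      (fun y hy => hl y (by simp [hy]))

theorem foldl_nGet_absent (l : List ((String × String) × Int))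
    (d : PySem.Dict String (PySem.Dict String Int)) (k c : String)
    (hl : ∀ x ∈ l, x.1 ≠ (k, c)) :
    nGet (l.foldl nsetP d) k c = nGet d k c := by
  induction l generalizing d with
  | nil => rfl
  | cons x l ih =>
    simp only [List.foldl_cons]
    rw [ih (nsetP d x) (fun y hy => hl y (by simp [hy]))]
    unfold nsetP
    rw [nGet_nset]
    have hx := hl x (by simp)
    have hne : ¬(k = x.1.1 ∧ c = x.1.2) := by
      rintro ⟨h1, h2⟩; exact hx (by rw [h1, h2])
    simp [hne]

-- key step: rebuilding after one counter increment equals one iteration of A's loop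
theorem step_main (C : PySem.Dict (String × String) Int) (hnd : C.keys.Nodup)
    (p : String × String) :
    (rcCount C p).items.foldl nsetP PySem.Dict.empty =
      rcStepA (C.items.foldl nsetP PySem.Dict.empty) p := by
  obtain ⟨k, c⟩ := p
  by_cases hC : C.contains (k, c) = true
  · have hsome : (C.get? (k, c)).isSome := by
      rw [← PySem.Dict.contains_eq_isSome_get?]; exact hC
    obtain ⟨n, hget⟩ := Option.isSome_iff_exists.mp hsome
    have hmem : ((k, c), n) ∈ C.items := PySem.Dict.mem_items_of_get?_eq_some _ hget
    obtain ⟨l1, l2, hsplit⟩ := List.append_of_mem hmem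
    have hkeys : C.keys = l1.map Prod.fst ++ (k, c) :: l2.map Prod.fst := by
      simp [PySem.Dict.keys, hsplit]
    have hnd' : (l1.map Prod.fst ++ (k, c) :: l2.map Prod.fst).Nodup := hkeys ▸ hnd
    have hl1 : ∀ x ∈ l1, x.1 ≠ (k, c) := by
      intro x hx h
      have hmem1 : (k, c) ∈ List.map Prod.fst l1 := by
        rw [← h]; exact List.mem_map_of_mem (f := Prod.fst) hx
      exact (List.disjoint_of_nodup_append hnd') hmem1 (by simp)
    have hl2 : ∀ x ∈ l2, x.1 ≠ (k, c) := by
      intro x hx h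
      have hnd2 := (List.nodup_append.mp hnd').2.1
      refine (List.nodup_cons.mp hnd2).1 ?_
      rw [← h]
      exact List.mem_map_of_mem (f := Prod.fst) hx
    have hgetD : C.getD (k, c) (0 : Int) = n := PySem.Dict.getD_of_get?_eq_some _ _ hget
    have hitems : (rcCount C (k, c)).items = l1 ++ ((k, c), n + 1) :: l2 := by
      unfold rcCount
      rw [PySem.Dict.items_insert_of_contains C _ hC, hgetD, hsplit, List.map_append, List.map_cons]
      have e1 : l1.map (fun p => if p.1 == (k, c) then ((k, c), n + 1) else p) = l1 := by
        rw [List.map_congr_left (g := id) (fun x hx => by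
          simp [hl1 x hx]), List.map_id]
      have e2 : l2.map (fun p => if p.1 == (k, c) then ((k, c), n + 1) else p) = l2 := by
        rw [List.map_congr_left (g := id) (fun x hx => by
          simp [hl2 x hx]), List.map_id]
      rw [e1, e2]; simp
    rw [hitems, hsplit]
    simp only [List.foldl_append, List.foldl_cons]
    set d1 := l1.foldl nsetP PySem.Dict.empty with hd1
    set d2 := nsetP d1 ((k, c), n) with hd2
    have hkey : nsetP d1 ((k, c), n + 1) = nset d2 k c (n + 1) := by
      rw [hd2]; unfold nsetP nset
      rw [PySem.Dict.getD_insert_self, PySem.Dict.insert_insert_self,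
          PySem.Dict.insert_insert_self]
    have hk2 : d2.contains k = true := by
      rw [hd2]; unfold nsetP nset; exact PySem.Dict.contains_insert_self _ _ _
    have hc2 : (d2.getD k PySem.Dict.empty).contains c = true := by
      rw [hd2]; unfold nsetP nset
      rw [PySem.Dict.getD_insert_self]; exact PySem.Dict.contains_insert_self _ _ _
    rw [hkey, foldl_nset_comm l2 d2 k c (n + 1) hk2 hc2 hl2]
    set D := l2.foldl nsetP d2 with hD
    have hnget : nGet D k c = some n := by
      rw [hD, foldl_nGet_absent l2 d2 k c hl2, hd2]
      unfold nsetP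
      rw [nGet_nset]; simp
    obtain ⟨i, hDi, hic⟩ : ∃ i, D.get? k = some i ∧ i.get? c = some n := by
      unfold nGet at hnget
      cases h : D.get? k with
      | none => rw [h] at hnget; simp at hnget
      | some i => rw [h] at hnget; exact ⟨i, rfl, by simpa using hnget⟩
    have hDk : D.contains k = true := by
      rw [PySem.Dict.contains_eq_isSome_get?, hDi]; rfl
    have hDinner : D.getD k PySem.Dict.empty = i := PySem.Dict.getD_of_get?_eq_some _ _ hDi
    have hicontains : i.contains c = true := by
      rw [PySem.Dict.contains_eq_isSome_get?, hic]; rfl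
    have higetD : i.getD c (0 : Int) = n := PySem.Dict.getD_of_get?_eq_some _ _ hic
    unfold rcStepA
    simp only [hDk, if_pos, hDinner, hicontains, higetD]
    unfold nset
    rw [hDinner]
  · have hitems : (rcCount C (k, c)).items = C.items ++ [((k, c), (0 : Int) + 1)] := by
      unfold rcCount
      rw [PySem.Dict.items_insert_of_not_contains C _ (by simpa using hC),
          PySem.Dict.getD_of_not_contains C _ (by simpa using hC)]
    rw [hitems]
    simp only [List.foldl_append, List.foldl_cons, List.foldl_nil]
    set D := C.items.foldl nsetP PySem.Dict.empty with hD
    have hAbs : ∀ x ∈ C.items, x.1 ≠ (k, c) := by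
      intro x hx h
      apply absurd hC
      simp only [Bool.not_eq_true] at *
      rw [Bool.not_eq_false, PySem.Dict.contains_iff_mem_keys]
      rw [show ((k, c) : String × String) = x.1 from h.symm]
      show x.1 ∈ C.items.map Prod.fst
      exact List.mem_map_of_mem (f := Prod.fst) hx
    have hnone : nGet D k c = none := by
      rw [hD, foldl_nGet_absent C.items PySem.Dict.empty k c hAbs]
      unfold nGet
      rw [PySem.Dict.get?_empty]; rfl
    show nsetP D ((k, c), (0 : Int) + 1) = rcStepA D (k, c)
    by_cases hDk : D.contains k = true
    · have hsome : (D.get? k).isSome := by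
        rw [← PySem.Dict.contains_eq_isSome_get?]; exact hDk
      obtain ⟨i, hDi⟩ := Option.isSome_iff_exists.mp hsome
      have hic : i.get? c = none := by
        unfold nGet at hnone; rw [hDi] at hnone; simpa using hnone
      have hicont : i.contains c = false := by
        rw [PySem.Dict.contains_eq_isSome_get?, hic]; rfl
      unfold rcStepA nsetP nset
      simp only [hDk, if_pos, PySem.Dict.getD_of_get?_eq_some _ _ hDi, hicont,
        Bool.false_eq_true, if_false]
      norm_num
    · unfold rcStepA nsetP nset
      simp only [hDk, Bool.false_eq_true, if_false]
      rw [PySem.Dict.setdefault_of_not_contains _ _ (by simpa using hDk),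
          PySem.Dict.getD_of_not_contains _ _ (by simpa using hDk)]
      norm_num
      rfl

theorem fold_main (records : List (String × String)) :
    (records.foldl rcCount PySem.Dict.empty).items.foldl nsetP PySem.Dict.empty =
      records.foldl rcStepA PySem.Dict.empty := by
  induction records using List.reverseRecOn with
  | nil => rfl
  | append_singleton xs p ih =>
    have hnd : (xs.foldl rcCount PySem.Dict.empty).keys.Nodup := by
      have e : xs.foldl rcCount PySem.Dict.empty =
          xs.foldl (fun d x => d.insert x (d.getD x 0 + 1)) PySem.Dict.empty := by
        unfold rcCount; rfl
      rw [e]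
      exact PySem.Dict.nodup_keys_foldl_insert xs (fun d x => d.getD x 0 + 1)
        PySem.Dict.empty PySem.Dict.nodup_keys_empty
    rw [List.foldl_append, List.foldl_append]
    simp only [List.foldl_cons, List.foldl_nil]
    rw [step_main _ hnd p, ih]

-- ===== VERDICT (by name: the statement is the Claim_ definition above) =====
theorem record_count_spec : Claim_equal_record_count := by
  intro records _
  unfold Spec_record_count
  show record_count records =
    (((records.foldl rcCount PySem.Dict.empty).items.foldl rcBuild PySem.Dict.empty).items).map
      (fun p => (p.1, p.2.items))
  unfold record_count
  rw [rcBuild_funext, fold_main]
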